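-- pv_equiv track=rewrite | github.com/SophiaRauh/fr_de_connectives_alignment | processing_filtering.py | remove_incomplete_phrases
-- ===== SOURCE A (Python) =====
-- from copy import deepcopy
--
-- def remove_incomplete_phrases(alignments):
--     """Removes phrases of the form "à ... occasion" if a complete
--     phrase ("à l' occasion") exists
--
--     Parameters
--     ----------
--     alignments : dict
--         An already filtered alignment
--
--     Returns
--     -------
--     filtered_alignments : dict
--        The alignment without the incomplete phrases
--     """
--
--     filtered_alignments = deepcopy(alignments)
--
--     for source, targets in alignments.items():
--         for target in targets.keys():
--             target_tokens = target.split()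
--             if len(target_tokens) >= 3 and "..." in target:
--                 for compare_target in targets.keys():
--                     target_complete = compare_target.split()
--                     clean_target = deepcopy(target_tokens)
--                     clean_target.remove("...")
--                     if len(target_complete) >= 3\
--                             and "..." not in compare_target\
--                             and target_tokens[0] == target_complete[0]\
--                             and target_tokens[-1] == target_complete[-1]\
--                             and all(map(str.isalpha, target_complete))\
--                             and clean_target != target_complete:
--                         try:
--                             del filtered_alignments[source][target]
--                         except KeyError:
--                             pass
--
--     return filtered_alignments
-- ===== SOURCE B (Python) =====
-- def remove_incomplete_phrases(alignments):
--     """Removes phrases of the form "a ... occasion" if a complete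
--     phrase ("a l' occasion") exists.
--
--     One pass per source: complete phrases are indexed by
--     (first token, last token), so each incomplete phrase does one
--     dictionary lookup instead of rescanning all targets."""
--     result = {}
--     for source, targets in alignments.items():
--         index = {}
--         for cand in targets:
--             toks = cand.split()
--             if len(toks) >= 3 and "..." not in cand and all(t.isalpha() for t in toks):
--                 key = (toks[0], toks[-1])
--                 index[key] = index.get(key, []) + [toks]
--         kept = {}
--         for target, value in targets.items():
--             toks = target.split()
--             if len(toks) >= 3 and "..." in toks:
--                 clean = list(toks)
--                 clean.remove("...")
--                 if any(c != clean for c in index.get((toks[0], toks[-1]), [])):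
--                     continue
--             kept[target] = value
--         result[source] = kept
--     return result
-- ===== Notes on version B (the rewrite author's own statement) =====
-- stated objective: faster
-- what changed: Instead of rescanning all targets of a source for every '...'-phrase, B builds, per source, a dictionary indexing the complete all-alpha phrases by their (first token, last token) pair and decides each '...'-phrase with one lookup, rebuilding the kept dict in one pass.
-- outside the precondition, e.g. on remove_incomplete_phrases({'s': {'x ...y z': 1}}): A raises ValueError, B returns {'s': {'x ...y z': 1}}
import Mathlib
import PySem

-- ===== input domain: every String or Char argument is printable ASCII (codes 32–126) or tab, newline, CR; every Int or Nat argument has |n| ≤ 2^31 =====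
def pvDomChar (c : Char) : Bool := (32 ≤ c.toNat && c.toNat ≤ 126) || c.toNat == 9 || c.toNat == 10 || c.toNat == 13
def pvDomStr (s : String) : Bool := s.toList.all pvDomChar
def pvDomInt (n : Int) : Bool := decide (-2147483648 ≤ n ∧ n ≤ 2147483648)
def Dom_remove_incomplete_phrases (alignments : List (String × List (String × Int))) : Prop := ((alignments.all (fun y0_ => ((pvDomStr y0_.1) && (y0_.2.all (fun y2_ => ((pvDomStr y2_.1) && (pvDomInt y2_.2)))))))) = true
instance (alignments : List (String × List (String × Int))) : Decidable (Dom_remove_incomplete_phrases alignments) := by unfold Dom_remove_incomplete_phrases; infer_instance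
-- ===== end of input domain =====

-- B replaces A's quadratic rescan of all targets of a source by a per-source index of complete
-- phrases keyed by (first token, last token): one lookup per '...'-phrase (objective: faster).


-- ===== PORT A =====
-- del d[target]: remove the (single) entry with that key; missing key handled by the caller
def pvEraseKey (d : List (String × Int)) (t : String) : List (String × Int) :=
  match d with
  | [] => []
  | p :: rest => if p.1 == t then rest else p :: pvEraseKey rest t

-- try: del filtered[source][target] except KeyError: pass  (no change when either key is absent)
def pvDel (filtered : List (String × List (String × Int))) (source target : String) :
    List (String × List (String × Int)) :=
  match filtered with
  | [] => []
  | p :: rest =>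
      if p.1 == source then (p.1, pvEraseKey p.2 target) :: rest
      else p :: pvDel rest source target

-- the compare-loop condition of A (clean_target = target_tokens with the first "..." removed;
-- "..." ∈ target_tokens is guaranteed by Pre_, else Python's list.remove raises ValueError)
abbrev pvCmpA (target_tokens : List String) (compare_target : String) : Prop :=
  let target_complete := PySem.Str.split₀ compare_target
  let clean_target := target_tokens.erase "..."
  3 ≤ target_complete.length ∧ PySem.Str.isIn "..." compare_target = false ∧
  PySem.List.pyGetD target_tokens 0 "" = PySem.List.pyGetD target_complete 0 "" ∧
  PySem.List.pyGetD target_tokens (-1) "" = PySem.List.pyGetD target_complete (-1) "" ∧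
  target_complete.all PySem.Str.strIsalpha = true ∧
  clean_target ≠ target_complete

-- body of A's loop over targets.keys(): the compare loop, run when the target looks incomplete
def pvTargetStep (ts : List (String × Int)) (source : String)
    (filtered : List (String × List (String × Int))) (tp : String × Int) :
    List (String × List (String × Int)) :=
  let target_tokens := PySem.Str.split₀ tp.1
  if 3 ≤ target_tokens.length ∧ PySem.Str.isIn "..." tp.1 = true then
    ts.foldl (fun filtered cp =>
      if pvCmpA target_tokens cp.1 then pvDel filtered source tp.1 else filtered) filtered
  else filtered

def remove_incomplete_phrases (alignments : List (String × List (String × Int))) :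
    List (String × List (String × Int)) :=
  alignments.foldl (fun filtered st => st.2.foldl (pvTargetStep st.2 st.1) filtered) alignments

-- ===== PORT B =====
-- a complete phrase: ≥ 3 tokens, no "...", all tokens alphabetic
abbrev pvCompleteB (cand : String) : Prop :=
  let toks := PySem.Str.split₀ cand
  3 ≤ toks.length ∧ PySem.Str.isIn "..." cand = false ∧ toks.all PySem.Str.strIsalpha = true

-- index[key] = index.get(key, []) + [toks]  for complete phrases, key = (toks[0], toks[-1])
def pvIndexStep (idx : PySem.Dict (String × String) (List (List String))) (cp : String × Int) :
    PySem.Dict (String × String) (List (List String)) :=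
  let toks := PySem.Str.split₀ cp.1
  if pvCompleteB cp.1 then
    let key := (PySem.List.pyGetD toks 0 "", PySem.List.pyGetD toks (-1) "")
    idx.insert key (idx.getD key [] ++ [toks])
  else idx

-- keep target unless it is an incomplete phrase with a different complete phrase under its key
def pvKeptStep (index : PySem.Dict (String × String) (List (List String)))
    (kept : List (String × Int)) (tp : String × Int) : List (String × Int) :=
  let toks := PySem.Str.split₀ tp.1
  if 3 ≤ toks.length ∧ "..." ∈ toks then
    let clean := toks.erase "..."
    if (index.getD (PySem.List.pyGetD toks 0 "", PySem.List.pyGetD toks (-1) "") []).any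
        (fun c => decide (c ≠ clean)) then kept
    else kept ++ [tp]
  else kept ++ [tp]

def remove_incomplete_phrases_alt (alignments : List (String × List (String × Int))) :
    List (String × List (String × Int)) :=
  alignments.foldl (fun result st =>
    let index := st.2.foldl pvIndexStep PySem.Dict.empty
    let kept := st.2.foldl (pvKeptStep index) []
    result ++ [(st.1, kept)]) []

-- ===== PRECONDITION & SPEC =====
-- Pre_ excludes association lists with duplicate source or target keys (not representable as
-- distinct Python dict entries, so any assoc-list behaviour there would be accidental) and
-- targets containing "..." as a substring but not as a whitespace token, on which A raises
-- ValueError from list.remove.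
def Pre_remove_incomplete_phrases (alignments : List (String × List (String × Int))) : Prop :=
  (alignments.map (·.1)).Nodup ∧
  ∀ p ∈ alignments, (p.2.map (·.1)).Nodup ∧
    ∀ q ∈ p.2, 3 ≤ (PySem.Str.split₀ q.1).length →
      (PySem.Str.isIn "..." q.1 = true ↔ "..." ∈ PySem.Str.split₀ q.1)
instance (alignments : List (String × List (String × Int))) : Decidable (Pre_remove_incomplete_phrases alignments) := by unfold Pre_remove_incomplete_phrases; infer_instance
def pvWitness_remove_incomplete_phrases : (List (String × List (String × Int))) :=
  [("s", [("a ... c", 1), ("a b c", 2)])]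

def Spec_remove_incomplete_phrases (alignments : List (String × List (String × Int))) (out : List (String × List (String × Int))) : Prop := out = remove_incomplete_phrases_alt alignments
instance (alignments : List (String × List (String × Int))) (out : List (String × List (String × Int))) : Decidable (Spec_remove_incomplete_phrases alignments out) := by unfold Spec_remove_incomplete_phrases; infer_instance

-- ===== CLAIM (what is proved, stated in full; the proofs are below) =====
def Claim_equal_remove_incomplete_phrases : Prop := ∀ (alignments : List (String × List (String × Int))), Dom_remove_incomplete_phrases alignments → Pre_remove_incomplete_phrases alignments → Spec_remove_incomplete_phrases alignments (remove_incomplete_phrases alignments)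

-- ===== LEMMAS AND PROOFS =====

-- A target of ts is deleted by A iff it looks incomplete and some compare target qualifies
abbrev pvFlagged (ts : List (String × Int)) (t : String) : Prop :=
  (3 ≤ (PySem.Str.split₀ t).length ∧ PySem.Str.isIn "..." t = true) ∧
  (ts.any fun cp => decide (pvCmpA (PySem.Str.split₀ t) cp.1)) = true

-- A's per-source result, in closed form
def pvPerA (ts : List (String × Int)) : List (String × Int) :=
  ts.filter (fun p => decide (¬ pvFlagged ts p.1))

-- B's per-source result, as the port computes it
def pvPerB (st : String × List (String × Int)) : String × List (String × Int) :=
  (st.1, st.2.foldl (pvKeptStep (st.2.foldl pvIndexStep PySem.Dict.empty)) [])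

-- B's drop condition for a target, spelled out
abbrev pvDropB (index : PySem.Dict (String × String) (List (List String)))
    (tp : String × Int) : Prop :=
  (3 ≤ (PySem.Str.split₀ tp.1).length ∧ "..." ∈ PySem.Str.split₀ tp.1) ∧
  ((index.getD (PySem.List.pyGetD (PySem.Str.split₀ tp.1) 0 "",
      PySem.List.pyGetD (PySem.Str.split₀ tp.1) (-1) "") []).any
    fun c => decide (c ≠ (PySem.Str.split₀ tp.1).erase "...")) = true

lemma pvEraseKey_not_mem (d : List (String × Int)) (t : String) (h : t ∉ d.map Prod.fst) :
    pvEraseKey d t = d := by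
  induction d with
  | nil => rfl
  | cons p rest ih =>
    simp only [List.map_cons, List.mem_cons, not_or] at h
    simp only [pvEraseKey]
    rw [if_neg (by simp only [beq_iff_eq]; exact fun e => h.1 e.symm), ih h.2]

lemma pvEraseKey_eq_filter (d : List (String × Int)) (t : String)
    (h : (d.map Prod.fst).Nodup) :
    pvEraseKey d t = d.filter (fun p => decide (p.1 ≠ t)) := by
  induction d with
  | nil => rfl
  | cons p rest ih =>
    simp only [List.map_cons, List.nodup_cons] at h
    by_cases hp : p.1 = t
    · simp only [pvEraseKey]
      rw [if_pos (by simpa using hp)]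
      rw [List.filter_cons, if_neg (by simpa using hp)]
      rw [List.filter_eq_self.2]
      intro q hq
      simp only [decide_eq_true_eq]
      intro hqt
      exact h.1 (by rw [hp, ← hqt]; exact List.mem_map_of_mem hq)
    · simp only [pvEraseKey]
      rw [if_neg (by simpa using hp), List.filter_cons, if_pos (by simpa using hp), ih h.2]

lemma pvEraseKey_keys_sublist (d : List (String × Int)) (t : String) :
    ((pvEraseKey d t).map Prod.fst).Sublist (d.map Prod.fst) := by
  induction d with
  | nil => exact List.Sublist.refl _
  | cons p rest ih =>
    simp only [pvEraseKey]
    by_cases hp : p.1 == t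
    · rw [if_pos hp]
      exact List.sublist_cons_self _ _
    · rw [if_neg hp]
      simpa using ih.cons₂ p.1

lemma pvEraseKey_nodup (d : List (String × Int)) (t : String)
    (h : (d.map Prod.fst).Nodup) : ((pvEraseKey d t).map Prod.fst).Nodup :=
  (pvEraseKey_keys_sublist d t).nodup h

lemma pvEraseKey_idem (d : List (String × Int)) (t : String)
    (h : (d.map Prod.fst).Nodup) :
    pvEraseKey (pvEraseKey d t) t = pvEraseKey d t := by
  apply pvEraseKey_not_mem
  rw [pvEraseKey_eq_filter d t h]
  simp

lemma pvDel_shape (pre post : List (String × List (String × Int))) (d : List (String × Int))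
    (source target : String) (h : source ∉ pre.map Prod.fst) :
    pvDel (pre ++ (source, d) :: post) source target
      = pre ++ (source, pvEraseKey d target) :: post := by
  induction pre with
  | nil => simp [pvDel]
  | cons p rest ih =>
    simp only [List.map_cons, List.mem_cons, not_or] at h
    simp only [List.cons_append, pvDel]
    rw [if_neg (by simp only [beq_iff_eq]; exact fun e => h.1 e.symm), ih h.2]

lemma pvInner_shape (tt : List String) (l : List (String × Int)) (s t : String)
    (pre post : List (String × List (String × Int))) (d : List (String × Int))
    (h : s ∉ pre.map Prod.fst) (hd : (d.map Prod.fst).Nodup) :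
    l.foldl (fun filtered cp =>
        if pvCmpA tt cp.1 then pvDel filtered s t else filtered) (pre ++ (s, d) :: post)
      = pre ++ (s, if (l.any fun cp => decide (pvCmpA tt cp.1)) = true
          then pvEraseKey d t else d) :: post := by
  induction l generalizing d with
  | nil =>
    rw [List.foldl_nil, if_neg (by simp)]
  | cons cp l ih =>
    rw [List.foldl_cons]
    by_cases hc : pvCmpA tt cp.1
    · rw [if_pos hc, pvDel_shape pre post d s t h,
        ih (pvEraseKey d t) (pvEraseKey_nodup d t hd),
        if_pos (show ((cp :: l).any fun cp => decide (pvCmpA tt cp.1)) = true from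
          List.any_eq_true.2 ⟨cp, List.mem_cons_self .., decide_eq_true hc⟩)]
      by_cases ha : (l.any fun cp => decide (pvCmpA tt cp.1)) = true
      · rw [if_pos ha, pvEraseKey_idem d t hd]
      · rw [if_neg ha]
    · rw [if_neg hc, ih d hd]
      have heq : ((cp :: l).any fun cp => decide (pvCmpA tt cp.1))
          = (l.any fun cp => decide (pvCmpA tt cp.1)) := by
        simp only [List.any_cons]
        rw [decide_eq_false hc, Bool.false_or]
      rw [heq]

lemma pvMiddle_shape (ts l : List (String × Int)) (s : String)
    (pre post : List (String × List (String × Int))) (d : List (String × Int))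
    (h : s ∉ pre.map Prod.fst) (hd : (d.map Prod.fst).Nodup) :
    l.foldl (pvTargetStep ts s) (pre ++ (s, d) :: post)
      = pre ++ (s, l.foldl (fun d tp =>
          if pvFlagged ts tp.1 then d.filter (fun p => decide (p.1 ≠ tp.1)) else d) d)
          :: post := by
  induction l generalizing d with
  | nil => rw [List.foldl_nil, List.foldl_nil]
  | cons tp l ih =>
    rw [List.foldl_cons, List.foldl_cons]
    simp only [pvTargetStep]
    by_cases ho : 3 ≤ (PySem.Str.split₀ tp.1).length ∧ PySem.Str.isIn "..." tp.1 = true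
    · rw [if_pos ho, pvInner_shape (PySem.Str.split₀ tp.1) ts s tp.1 pre post d h hd]
      by_cases ha : (ts.any fun cp => decide (pvCmpA (PySem.Str.split₀ tp.1) cp.1)) = true
      · rw [if_pos ha, ih (pvEraseKey d tp.1) (pvEraseKey_nodup d tp.1 hd),
          if_pos (show pvFlagged ts tp.1 from ⟨ho, ha⟩),
          pvEraseKey_eq_filter d tp.1 hd]
      · rw [if_neg ha, ih d hd, if_neg (show ¬ pvFlagged ts tp.1 from fun hf => ha hf.2)]
    · rw [if_neg ho, ih d hd, if_neg (show ¬ pvFlagged ts tp.1 from fun hf => ho hf.1)]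

lemma pvErase_fold_filter (P : (String × Int) → Prop) [DecidablePred P]
    (l d : List (String × Int)) :
    l.foldl (fun d tp => if P tp then d.filter (fun p => decide (p.1 ≠ tp.1)) else d) d
      = d.filter (fun p => decide (∀ tp ∈ l, P tp → p.1 ≠ tp.1)) := by
  induction l generalizing d with
  | nil =>
    rw [List.foldl_nil]
    symm
    apply List.filter_eq_self.2
    intro q hq
    simp
  | cons tp l ih =>
    rw [List.foldl_cons]
    by_cases h : P tp
    · rw [if_pos h, ih, List.filter_filter]
      apply List.filter_congr
      intro q _
      rw [Bool.eq_iff_iff]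
      simp only [Bool.and_eq_true, decide_eq_true_eq, List.mem_cons, forall_eq_or_imp]
      tauto
    · rw [if_neg h, ih]
      apply List.filter_congr
      intro q _
      rw [Bool.eq_iff_iff]
      simp only [decide_eq_true_eq, List.mem_cons, forall_eq_or_imp]
      tauto

lemma pvPerA_eq (ts : List (String × Int)) :
    ts.foldl (fun d tp =>
        if pvFlagged ts tp.1 then d.filter (fun p => decide (p.1 ≠ tp.1)) else d) ts
      = pvPerA ts := by
  rw [pvErase_fold_filter (fun tp => pvFlagged ts tp.1) ts ts, pvPerA]
  apply List.filter_congr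
  intro q hq
  rw [decide_eq_decide]
  constructor
  · intro hall hflag
    exact hall q hq hflag rfl
  · intro hnot tp htp hflag heq
    exact hnot (by rw [heq]; exact hflag)

-- A in closed form
lemma pvA_eq_map (l pre : List (String × List (String × Int)))
    (hdis : ∀ st ∈ l, st.1 ∉ pre.map Prod.fst)
    (hnd : (l.map Prod.fst).Nodup)
    (hts : ∀ st ∈ l, (st.2.map Prod.fst).Nodup) :
    l.foldl (fun filtered st => st.2.foldl (pvTargetStep st.2 st.1) filtered) (pre ++ l)
      = pre ++ l.map (fun st => (st.1, pvPerA st.2)) := by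
  induction l generalizing pre with
  | nil => rfl
  | cons st l ih =>
    obtain ⟨s, ts⟩ := st
    rw [List.foldl_cons]
    have hnds : (ts.map Prod.fst).Nodup := hts (s, ts) (List.mem_cons_self ..)
    rw [show pre ++ (s, ts) :: l = pre ++ (s, ts) :: l from rfl,
      pvMiddle_shape ts ts s pre l ts (hdis (s, ts) (List.mem_cons_self ..)) hnds,
      pvPerA_eq ts]
    rw [show pre ++ (s, pvPerA ts) :: l = (pre ++ [(s, pvPerA ts)]) ++ l by simp]
    rw [ih (pre ++ [(s, pvPerA ts)])
      (by
        intro st' hst'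
        simp only [List.map_append, List.mem_append, List.map_cons, List.map_nil,
          List.mem_singleton]
        rintro (hin | hin)
        · exact hdis st' (List.mem_cons_of_mem _ hst') hin
        · simp only [List.map_cons, List.nodup_cons] at hnd
          exact hnd.1 (hin ▸ List.mem_map_of_mem hst'))
      (by simp only [List.map_cons, List.nodup_cons] at hnd; exact hnd.2)
      (fun st' hst' => hts st' (List.mem_cons_of_mem _ hst'))]
    simp

-- B in closed form
lemma pvB_eq_map (alignments : List (String × List (String × Int))) :
    remove_incomplete_phrases_alt alignments = alignments.map pvPerB := by
  have h : remove_incomplete_phrases_alt alignments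
      = alignments.foldl (fun result st => result ++ [pvPerB st]) [] := rfl
  rw [h, PySem.List.foldl_append_singleton_eq_map]
  simp

-- the index lookup lists exactly the token lists of the complete phrases under that key
lemma pvIndex_getD (ts : List (String × Int)) (k : String × String) :
    (ts.foldl pvIndexStep PySem.Dict.empty).getD k []
      = (((ts.filter (fun cp => decide (pvCompleteB cp.1))).filter
          (fun cp => (PySem.List.pyGetD (PySem.Str.split₀ cp.1) 0 "",
            PySem.List.pyGetD (PySem.Str.split₀ cp.1) (-1) "") == k)).map
          (fun cp => PySem.Str.split₀ cp.1)) := by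
  have hstep : pvIndexStep = fun idx (cp : String × Int) =>
      if pvCompleteB cp.1 then
        idx.modify (PySem.List.pyGetD (PySem.Str.split₀ cp.1) 0 "",
          PySem.List.pyGetD (PySem.Str.split₀ cp.1) (-1) "") [] (· ++ [PySem.Str.split₀ cp.1])
      else idx := rfl
  rw [hstep, PySem.List.foldl_ite_eq_foldl_filter]
  rw [show (ts.filter (fun cp => decide (pvCompleteB cp.1))).foldl
      (fun idx (cp : String × Int) =>
        idx.modify (PySem.List.pyGetD (PySem.Str.split₀ cp.1) 0 "",
          PySem.List.pyGetD (PySem.Str.split₀ cp.1) (-1) "") [] (· ++ [PySem.Str.split₀ cp.1]))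
      PySem.Dict.empty
    = ((ts.filter (fun cp => decide (pvCompleteB cp.1))).map
        (fun cp => ((PySem.List.pyGetD (PySem.Str.split₀ cp.1) 0 "",
          PySem.List.pyGetD (PySem.Str.split₀ cp.1) (-1) ""), PySem.Str.split₀ cp.1))).foldl
      (fun idx p => idx.modify p.1 [] (· ++ [p.2])) PySem.Dict.empty from by
        rw [List.foldl_map]]
  rw [PySem.Dict.getD_foldl_modify_append]
  rw [List.filter_map, List.map_map]
  simp [Function.comp_def]

lemma pvKept_eq_filter (index : PySem.Dict (String × String) (List (List String)))
    (ts : List (String × Int)) :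
    ts.foldl (pvKeptStep index) [] = ts.filter (fun tp => decide (¬ pvDropB index tp)) := by
  have h : pvKeptStep index = fun kept tp =>
      if ¬ pvDropB index tp then kept ++ [tp] else kept := by
    funext kept tp
    simp only [pvKeptStep]
    by_cases h1 : 3 ≤ (PySem.Str.split₀ tp.1).length ∧ "..." ∈ PySem.Str.split₀ tp.1
    · rw [if_pos h1]
      by_cases h2 : ((index.getD (PySem.List.pyGetD (PySem.Str.split₀ tp.1) 0 "",
          PySem.List.pyGetD (PySem.Str.split₀ tp.1) (-1) "") []).any
            fun c => decide (c ≠ (PySem.Str.split₀ tp.1).erase "...")) = true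
      · rw [if_pos h2, if_neg (show ¬ ¬ pvDropB index tp from fun hn => hn ⟨h1, h2⟩)]
      · rw [if_neg h2, if_pos (show ¬ pvDropB index tp from fun hd => h2 hd.2)]
    · rw [if_neg h1, if_pos (show ¬ pvDropB index tp from fun hd => h1 hd.1)]
  rw [h, PySem.List.foldl_append_ite_eq_filter]
  rfl

-- per source, A's closed form equals B's computation
lemma pvPer_source_eq (s : String) (ts : List (String × Int))
    (hell : ∀ q ∈ ts, 3 ≤ (PySem.Str.split₀ q.1).length →
      (PySem.Str.isIn "..." q.1 = true ↔ "..." ∈ PySem.Str.split₀ q.1)) :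
    (s, pvPerA ts) = pvPerB (s, ts) := by
  simp only [pvPerB, pvPerA, Prod.mk.injEq, true_and]
  rw [pvKept_eq_filter]
  apply List.filter_congr
  intro tp htp
  rw [decide_eq_decide]
  apply not_congr
  constructor
  · rintro ⟨⟨hlen, hin⟩, hany⟩
    refine ⟨⟨hlen, (hell tp htp hlen).1 hin⟩, ?_⟩
    rw [pvIndex_getD, List.any_eq_true]
    rw [List.any_eq_true] at hany
    obtain ⟨cp, hcp, hc⟩ := hany
    rw [decide_eq_true_eq] at hc
    obtain ⟨h3, hni, h0, hm1, hal, hne⟩ := hc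
    refine ⟨PySem.Str.split₀ cp.1, ?_, ?_⟩
    · rw [List.mem_map]
      refine ⟨cp, ?_, rfl⟩
      rw [List.mem_filter, List.mem_filter]
      refine ⟨⟨hcp, ?_⟩, ?_⟩
      · rw [decide_eq_true_eq]
        exact ⟨h3, hni, hal⟩
      · rw [beq_iff_eq, Prod.mk.injEq]
        exact ⟨h0.symm, hm1.symm⟩
    · rw [decide_eq_true_eq]
      exact fun hh => hne hh.symm
  · rintro ⟨⟨hlen, hmem⟩, hany⟩
    refine ⟨⟨hlen, (hell tp htp hlen).2 hmem⟩, ?_⟩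
    rw [pvIndex_getD, List.any_eq_true] at hany
    obtain ⟨c, hcmem, hcne⟩ := hany
    rw [List.mem_map] at hcmem
    obtain ⟨cp, hcp2, rfl⟩ := hcmem
    rw [List.mem_filter, List.mem_filter] at hcp2
    obtain ⟨⟨hcp, hcomp⟩, hkey⟩ := hcp2
    rw [decide_eq_true_eq] at hcomp hcne
    rw [beq_iff_eq, Prod.mk.injEq] at hkey
    obtain ⟨h3, hni, hal⟩ := hcomp
    rw [List.any_eq_true]
    refine ⟨cp, hcp, ?_⟩
    rw [decide_eq_true_eq]
    exact ⟨h3, hni, hkey.1.symm, hkey.2.symm, hal, fun hh => hcne hh.symm⟩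

-- ===== VERDICT (by name: the statement is the Claim_ definition above) =====
theorem remove_incomplete_phrases_spec : Claim_equal_remove_incomplete_phrases := by
  intro alignments _ hpre
  obtain ⟨hnd, hrest⟩ := hpre
  unfold Spec_remove_incomplete_phrases
  rw [pvB_eq_map]
  rw [show remove_incomplete_phrases alignments
      = alignments.foldl (fun filtered st => st.2.foldl (pvTargetStep st.2 st.1) filtered)
          ([] ++ alignments) from rfl]
  rw [pvA_eq_map alignments [] (by simp) hnd (fun st hst => (hrest st hst).1)]
  simp only [List.nil_append]
  exact List.map_congr_left fun st hst => by
    obtain ⟨s, ts⟩ := st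
    exact pvPer_source_eq s ts (hrest (s, ts) hst).2
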